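-- pv_equiv track=rewrite | github.com/3saster/advent-of-code-2023 | Day 01/Solution.py | BackMatch
-- ===== SOURCE A (Python) =====
-- def BackMatch(string: str, strDict: dict):
--     """
--     Returns the value of the last matching key in the string.
--     """
--     matchInd = -1
--     matchVal = ""
--     for k in strDict.keys():
--         try: i = string.rindex(k)
--         except ValueError: i = -1
--
--         if i != -1 and i > matchInd:
--             matchInd = i
--             matchVal = k
--
--     try : return strDict[matchVal]
--     except KeyError: return 0
-- ===== SOURCE B (Python) =====
-- def BackMatch(string: str, strDict: dict):
--     """
--     Returns the value of the last matching key in the string.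
--     Single right-to-left scan over positions instead of one rindex per key.
--     """
--     for i in range(len(string), -1, -1):
--         for k, v in strDict.items():
--             if string.startswith(k, i):
--                 return v
--     return 0
-- ===== Notes on version B (the rewrite author's own statement) =====
-- stated objective: alternative
-- what changed: Instead of computing rindex for every key and keeping the running maximum plus a final dict lookup, B scans positions right-to-left once and returns the value of the first key (in dict order) that matches at the first position with any match, with no final lookup.
import Mathlib
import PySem

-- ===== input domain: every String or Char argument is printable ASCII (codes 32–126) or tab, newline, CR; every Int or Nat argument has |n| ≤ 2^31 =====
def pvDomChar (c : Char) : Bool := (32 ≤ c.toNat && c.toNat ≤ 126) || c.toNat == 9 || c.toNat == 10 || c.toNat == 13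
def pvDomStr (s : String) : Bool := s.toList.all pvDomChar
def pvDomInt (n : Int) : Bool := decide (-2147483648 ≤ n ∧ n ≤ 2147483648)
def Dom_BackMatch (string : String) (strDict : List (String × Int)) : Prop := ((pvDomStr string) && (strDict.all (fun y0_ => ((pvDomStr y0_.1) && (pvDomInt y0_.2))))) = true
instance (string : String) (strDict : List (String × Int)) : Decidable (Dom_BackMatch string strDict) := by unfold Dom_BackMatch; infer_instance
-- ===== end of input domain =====

-- B replaces A's per-key rindex maximisation with a single right-to-left scan over
-- positions that returns at the first (rightmost) match; objective: alternative
-- decomposition, same exact return value.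

-- ===== PORT A =====
-- loop body of A: try rindex/except → rfind (-1 if absent); keep (i, k) on strict improvement
def bmStep (string : String) (acc : Int × String) (k : String) : Int × String :=
  let i := PySem.Str.rfind string k
  if i ≠ -1 ∧ i > acc.1 then (i, k) else acc

def BackMatch (string : String) (strDict : List (String × Int)) : Int :=
  let d := PySem.Dict.ofList strDict
  let st := d.keys.foldl (bmStep string) ((-1 : Int), "")
  -- try strDict[matchVal] / except KeyError: return 0
  d.getD st.2 0

-- ===== PORT B =====
-- inner loop of Source B: first (k, v) of the dict items with string.startswith(k, i)
def bmFindAt (string : String) (items : List (String × Int)) (i : Nat) : Option Int :=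
  match items with
  | [] => none
  | (k, v) :: rest =>
    if PySem.Chars.startswith (string.toList.drop i) k.toList then some v
    else bmFindAt string rest i

-- outer loop of Source B: i from len(string) down to 0, return first hit, else 0
def bmScan (string : String) (items : List (String × Int)) : Nat → Int
  | 0 => match bmFindAt string items 0 with
         | some v => v
         | none => 0
  | i+1 => match bmFindAt string items (i+1) with
           | some v => v
           | none => bmScan string items i

def BackMatch_alt (string : String) (strDict : List (String × Int)) : Int :=
  bmScan string (PySem.Dict.ofList strDict).items string.toList.length

-- ===== PRECONDITION & SPEC =====
def Spec_BackMatch (string : String) (strDict : List (String × Int)) (out : Int) : Prop := out = BackMatch_alt string strDict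
instance (string : String) (strDict : List (String × Int)) (out : Int) : Decidable (Spec_BackMatch string strDict out) := by unfold Spec_BackMatch; infer_instance

-- ===== CLAIM (what is proved, stated in full; the proofs are below) =====
def Claim_equal_BackMatch : Prop := ∀ (string : String) (strDict : List (String × Int)), Dom_BackMatch string strDict → Spec_BackMatch string strDict (BackMatch string strDict)

-- ===== LEMMAS AND PROOFS =====

-- A's final lookup, written out over the items list
def bmAres (string : String) (l : List (String × Int)) : Int :=
  (((l.find? (fun p => p.1 == ((l.map Prod.fst).foldl (bmStep string) ((-1 : Int), "")).2)).map Prod.snd).getD 0)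

lemma backMatch_eq_bmAres (string : String) (strDict : List (String × Int)) :
    BackMatch string strDict = bmAres string (PySem.Dict.ofList strDict).items := by
  simp [BackMatch, bmAres, PySem.Dict.getD, PySem.Dict.get?, PySem.Dict.keys]

lemma bmStep_eq (string k : String) (acc : Int × String) :
    bmStep string acc k
      = if PySem.Str.rfind string k ≠ -1 ∧ PySem.Str.rfind string k > acc.1
        then (PySem.Str.rfind string k, k) else acc := rfl

-- equations of PySem.Chars.rfind.go
lemma go_zero (s sub : List Char) :
    PySem.Chars.rfind.go s sub 0 = if sub.isPrefixOf s then 0 else -1 := rfl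

lemma go_succ (s sub : List Char) (j : Nat) :
    PySem.Chars.rfind.go s sub (j+1)
      = if sub.isPrefixOf (s.drop (j+1)) then ((j : Int)+1) else PySem.Chars.rfind.go s sub j := by
  rfl

lemma go_le (s sub : List Char) : ∀ j : Nat, PySem.Chars.rfind.go s sub j ≤ (j : Int) := by
  intro j
  induction j with
  | zero => rw [go_zero]; split <;> omega
  | succ j ih => rw [go_succ]; split <;> [push_cast; skip] <;> omega

lemma neg_one_le_go (s sub : List Char) : ∀ j : Nat, -1 ≤ PySem.Chars.rfind.go s sub j := by
  intro j
  induction j with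
  | zero => rw [go_zero]; split <;> omega
  | succ j ih => rw [go_succ]; split <;> [push_cast; skip] <;> omega

lemma go_ge_of_prefix (s sub : List Char) {i j : Nat}
    (h : sub.isPrefixOf (s.drop i) = true) (hij : i ≤ j) :
    (i : Int) ≤ PySem.Chars.rfind.go s sub j := by
  induction j with
  | zero =>
    have hi : i = 0 := Nat.le_zero.mp hij
    subst hi
    simp only [List.drop_zero] at h
    rw [go_zero, if_pos h]
    norm_num
  | succ j ih =>
    rw [go_succ]
    rcases Nat.lt_or_ge j.succ i with hlt | hle
    · omega
    · rcases Nat.eq_or_lt_of_le hij with heq | hlt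
      · subst heq; rw [if_pos h]; push_cast; omega
      · have := ih (by omega)
        split <;> [push_cast; skip] <;> omega

lemma prefix_of_go_eq (s sub : List Char) : ∀ (j i : Nat),
    PySem.Chars.rfind.go s sub j = (i : Int) → sub.isPrefixOf (s.drop i) = true := by
  intro j
  induction j with
  | zero =>
    intro i h
    rw [go_zero] at h
    split at h
    · have : i = 0 := by omega
      subst this; simpa using ‹sub.isPrefixOf s = true›
    · omega
  | succ j ih =>
    intro i h
    rw [go_succ] at h
    split at h
    · have : i = j + 1 := by omega
      subst this; assumption
    · exact ih i h

-- the rfind of a key, seen through the bridge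
lemma rfind_eq_go (string k : String) :
    PySem.Str.rfind string k
      = PySem.Chars.rfind.go string.toList k.toList string.toList.length := by
  rw [PySem.Str.rfind_eq]; rfl

lemma neg_one_le_rfind (string k : String) : -1 ≤ PySem.Str.rfind string k := by
  rw [rfind_eq_go]; exact neg_one_le_go _ _ _

lemma rfind_ge_of_startswith (string k : String) (i : Nat) (hi : i ≤ string.toList.length)
    (h : PySem.Chars.startswith (string.toList.drop i) k.toList = true) :
    (i : Int) ≤ PySem.Str.rfind string k := by
  rw [rfind_eq_go]
  exact go_ge_of_prefix _ _ (h : k.toList.isPrefixOf (string.toList.drop i) = true) hi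

lemma rfind_ne_of_not_startswith (string k : String) (i : Nat)
    (h : PySem.Chars.startswith (string.toList.drop i) k.toList = false) :
    PySem.Str.rfind string k ≠ (i : Int) := by
  intro h0
  have hp : k.toList.isPrefixOf (string.toList.drop i) = true :=
    prefix_of_go_eq string.toList k.toList string.toList.length i
      (by rw [← rfind_eq_go]; exact h0)
  have h' : k.toList.isPrefixOf (string.toList.drop i) = false := h
  rw [hp] at h'
  exact Bool.noConfusion h'

-- A's fold: stays put when nothing improves
lemma foldA_id (string : String) : ∀ (ks : List String) (acc : Int × String),
    (∀ k ∈ ks, PySem.Str.rfind string k ≤ acc.1) →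
    ks.foldl (bmStep string) acc = acc := by
  intro ks
  induction ks with
  | nil => intro acc _; rfl
  | cons k ks ih =>
    intro acc h
    have hk := h k (List.mem_cons_self)
    have hstep : bmStep string acc k = acc := by
      rw [bmStep_eq, if_neg (by rintro ⟨h1, h2⟩; omega)]
    rw [List.foldl_cons, hstep]
    exact ih acc (fun k' hk' => h k' (List.mem_cons_of_mem _ hk'))

-- A's fold: first component stays below a strict bound
lemma foldA_lt (string : String) (i : Int) : ∀ (ks : List String) (acc : Int × String),
    acc.1 < i → (∀ k ∈ ks, PySem.Str.rfind string k < i) →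
    (ks.foldl (bmStep string) acc).1 < i := by
  intro ks
  induction ks with
  | nil => intro acc h _; exact h
  | cons k ks ih =>
    intro acc hacc h
    rw [List.foldl_cons]
    refine ih _ ?_ (fun k' hk' => h k' (List.mem_cons_of_mem _ hk'))
    rw [bmStep_eq]
    split
    · exact h k (List.mem_cons_self)
    · exact hacc

-- bmFindAt characterizations
lemma findAt_none (string : String) (i : Nat) : ∀ (l : List (String × Int)),
    bmFindAt string l i = none →
    ∀ p ∈ l, PySem.Chars.startswith (string.toList.drop i) p.1.toList = false := by
  intro l
  induction l with
  | nil => intro _ p hp; cases hp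
  | cons q l ih =>
    intro h p hp
    obtain ⟨k, v⟩ := q
    unfold bmFindAt at h
    cases hc : PySem.Chars.startswith (string.toList.drop i) k.toList with
    | true => rw [hc] at h; simp at h
    | false =>
      rw [hc] at h; simp only [Bool.false_eq_true, if_false] at h
      rcases List.mem_cons.mp hp with rfl | hp'
      · exact hc
      · exact ih h p hp'

lemma findAt_some (string : String) (i : Nat) : ∀ (l : List (String × Int)) (v : Int),
    bmFindAt string l i = some v →
    ∃ l1 k l2, l = l1 ++ (k, v) :: l2 ∧
      PySem.Chars.startswith (string.toList.drop i) k.toList = true ∧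
      ∀ p ∈ l1, PySem.Chars.startswith (string.toList.drop i) p.1.toList = false := by
  intro l
  induction l with
  | nil => intro v h; cases h
  | cons q l ih =>
    intro v h
    obtain ⟨k, v'⟩ := q
    unfold bmFindAt at h
    cases hc : PySem.Chars.startswith (string.toList.drop i) k.toList with
    | true =>
      rw [hc] at h; simp only [if_true] at h
      cases h
      exact ⟨[], k, l, by simp, hc, by simp⟩
    | false =>
      rw [hc] at h; simp only [Bool.false_eq_true, if_false] at h
      obtain ⟨l1, k0, l2, hl, hpre, hnone⟩ := ih v h
      refine ⟨(k, v') :: l1, k0, l2, by simp [hl], hpre, ?_⟩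
      intro p hp
      rcases List.mem_cons.mp hp with rfl | hp'
      · exact hc
      · exact hnone p hp'

-- first-match lookup when the key is absent from the prefix
lemma lookup_of_decomp (k0 : String) (v : Int) (l2 : List (String × Int)) :
    ∀ (l1 : List (String × Int)), (∀ p ∈ l1, p.1 ≠ k0) →
    ((l1 ++ (k0, v) :: l2).find? (fun p => p.1 == k0)).map Prod.snd = some v := by
  intro l1
  induction l1 with
  | nil => intro _; simp
  | cons q l1 ih =>
    intro h
    have hq : (q.1 == k0) = false := beq_eq_false_iff_ne.mpr (h q (List.mem_cons_self))
    rw [List.cons_append, List.find?_cons, hq]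
    exact ih (fun p hp => h p (List.mem_cons_of_mem _ hp))

lemma find?_empty_key_none (l : List (String × Int))
    (h : ∀ p ∈ l, p.1 ≠ "") :
    (l.find? (fun p => p.1 == "")).map Prod.snd = none := by
  rw [List.find?_eq_none.mpr (fun p hp => by
    simp only [beq_iff_eq]
    exact h p hp)]
  rfl

-- main scan invariant: once every key's rfind is ≤ i, the downward scan from i
-- returns exactly A's result
lemma scan_eq (string : String) (l : List (String × Int)) :
    ∀ i : Nat, i ≤ string.toList.length →
    (∀ k ∈ l.map Prod.fst, PySem.Str.rfind string k ≤ (i : Int)) →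
    bmScan string l i = bmAres string l := by
  intro i
  induction i with
  | zero =>
    intro _ hle
    cases hfind : bmFindAt string l 0 with
    | some v =>
      obtain ⟨l1, k0, l2, hl, hpre, hnone⟩ := findAt_some string 0 l v hfind
      have hmap : l.map Prod.fst = l1.map Prod.fst ++ k0 :: l2.map Prod.fst := by
        rw [hl]; simp
      have hge : ((0 : Nat) : Int) ≤ PySem.Str.rfind string k0 :=
        rfind_ge_of_startswith string k0 0 (Nat.zero_le _) hpre
      have hle0 : PySem.Str.rfind string k0 ≤ ((0 : Nat) : Int) := by
        apply hle; rw [hmap]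
        exact List.mem_append_right _ (List.mem_cons_self)
      have hr0 : PySem.Str.rfind string k0 = ((0 : Nat) : Int) := le_antisymm hle0 hge
      have hlt : ∀ k ∈ l1.map Prod.fst, PySem.Str.rfind string k < ((0 : Nat) : Int) := by
        intro k hk
        obtain ⟨p, hp, rfl⟩ := List.mem_map.mp hk
        have hne := rfind_ne_of_not_startswith string p.1 0 (hnone p hp)
        have hb : p.1 ∈ l.map Prod.fst := by
          rw [hmap]; exact List.mem_append_left _ (List.mem_map_of_mem hp)
        have := hle p.1 hb
        omega
      have hfold : (l.map Prod.fst).foldl (bmStep string) ((-1 : Int), "")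
          = (((0 : Nat) : Int), k0) := by
        rw [hmap, List.foldl_append]
        have h1 : ((l1.map Prod.fst).foldl (bmStep string) ((-1 : Int), "")).1
            < ((0 : Nat) : Int) :=
          foldA_lt string _ _ _ (by norm_num) hlt
        rw [List.foldl_cons]
        have hstep : bmStep string ((l1.map Prod.fst).foldl (bmStep string) ((-1 : Int), "")) k0
            = (((0 : Nat) : Int), k0) := by
          rw [bmStep_eq, hr0, if_pos ⟨by norm_num, by omega⟩]
        rw [hstep]
        apply foldA_id
        intro k hk
        have hb : k ∈ l.map Prod.fst := by
          rw [hmap]; exact List.mem_append_right _ (List.mem_cons_of_mem _ hk)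
        exact hle k hb
      have hne1 : ∀ p ∈ l1, p.1 ≠ k0 := by
        intro p hp heq
        have h1 := hnone p hp
        rw [heq, hpre] at h1
        exact Bool.noConfusion h1
      unfold bmScan
      rw [hfind, bmAres, hfold]
      simp only
      rw [hl, lookup_of_decomp k0 v l2 l1 hne1]
      rfl
    | none =>
      have hall := findAt_none string 0 l hfind
      have hfold : (l.map Prod.fst).foldl (bmStep string) ((-1 : Int), "") = (-1, "") := by
        apply foldA_id
        intro k hk
        obtain ⟨p, hp, rfl⟩ := List.mem_map.mp hk
        have h1 := hle p.1 (List.mem_map_of_mem hp)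
        have h2 := neg_one_le_rfind string p.1
        have hne := rfind_ne_of_not_startswith string p.1 0 (hall p hp)
        push_cast at h1 hne ⊢
        omega
      have hnoempty : ∀ p ∈ l, p.1 ≠ "" := by
        intro p hp heq
        have h1 := hall p hp
        rw [heq] at h1
        have hT : PySem.Chars.startswith (string.toList.drop 0) ("" : String).toList = true := rfl
        rw [hT] at h1
        exact Bool.noConfusion h1
      unfold bmScan
      rw [hfind, bmAres, hfold]
      simp only
      rw [find?_empty_key_none l hnoempty]
      rfl
  | succ j ih =>
    intro hj hle
    cases hfind : bmFindAt string l (j+1) with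
    | some v =>
      obtain ⟨l1, k0, l2, hl, hpre, hnone⟩ := findAt_some string (j+1) l v hfind
      have hmap : l.map Prod.fst = l1.map Prod.fst ++ k0 :: l2.map Prod.fst := by
        rw [hl]; simp
      have hge : (((j+1) : Nat) : Int) ≤ PySem.Str.rfind string k0 :=
        rfind_ge_of_startswith string k0 (j+1) hj hpre
      have hle0 : PySem.Str.rfind string k0 ≤ (((j+1) : Nat) : Int) := by
        apply hle; rw [hmap]
        exact List.mem_append_right _ (List.mem_cons_self)
      have hr0 : PySem.Str.rfind string k0 = (((j+1) : Nat) : Int) := le_antisymm hle0 hge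
      have hlt : ∀ k ∈ l1.map Prod.fst, PySem.Str.rfind string k < (((j+1) : Nat) : Int) := by
        intro k hk
        obtain ⟨p, hp, rfl⟩ := List.mem_map.mp hk
        have hne := rfind_ne_of_not_startswith string p.1 (j+1) (hnone p hp)
        have hb : p.1 ∈ l.map Prod.fst := by
          rw [hmap]; exact List.mem_append_left _ (List.mem_map_of_mem hp)
        have := hle p.1 hb
        omega
      have hfold : (l.map Prod.fst).foldl (bmStep string) ((-1 : Int), "")
          = ((((j+1) : Nat) : Int), k0) := by
        rw [hmap, List.foldl_append]
        have h1 : ((l1.map Prod.fst).foldl (bmStep string) ((-1 : Int), "")).1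
            < (((j+1) : Nat) : Int) :=
          foldA_lt string _ _ _ (by push_cast; omega) hlt
        rw [List.foldl_cons]
        have hstep : bmStep string ((l1.map Prod.fst).foldl (bmStep string) ((-1 : Int), "")) k0
            = ((((j+1) : Nat) : Int), k0) := by
          rw [bmStep_eq, hr0, if_pos ⟨by push_cast; omega, by omega⟩]
        rw [hstep]
        apply foldA_id
        intro k hk
        have hb : k ∈ l.map Prod.fst := by
          rw [hmap]; exact List.mem_append_right _ (List.mem_cons_of_mem _ hk)
        exact hle k hb
      have hne1 : ∀ p ∈ l1, p.1 ≠ k0 := by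
        intro p hp heq
        have h1 := hnone p hp
        rw [heq, hpre] at h1
        exact Bool.noConfusion h1
      unfold bmScan
      rw [hfind, bmAres, hfold]
      simp only
      rw [hl, lookup_of_decomp k0 v l2 l1 hne1]
      rfl
    | none =>
      have hall := findAt_none string (j+1) l hfind
      have hstep : ∀ k ∈ l.map Prod.fst, PySem.Str.rfind string k ≤ ((j : Nat) : Int) := by
        intro k hk
        obtain ⟨p, hp, rfl⟩ := List.mem_map.mp hk
        have h1 := hle p.1 (List.mem_map_of_mem hp)
        have hne := rfind_ne_of_not_startswith string p.1 (j+1) (hall p hp)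
        push_cast at h1 hne ⊢
        omega
      unfold bmScan
      rw [hfind]
      exact ih (by omega) hstep

-- ===== VERDICT (by name: the statement is the Claim_ definition above) =====
theorem BackMatch_spec : Claim_equal_BackMatch := by
  intro string strDict _
  unfold Spec_BackMatch
  rw [backMatch_eq_bmAres]
  unfold BackMatch_alt
  rw [scan_eq]
  · exact Nat.le_refl _
  · intro k _
    rw [rfind_eq_go]
    exact go_le _ _ _
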